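-- pv_equiv track=rewrite | github.com/1998apoorvmalik/rna-design-sat-reduction | data.py | generate_structures
-- ===== SOURCE A (Python) =====
-- def is_valid_structure(structure):
--     stack = []
--     for char in structure:
--         if char == '(':
--             stack.append(char)
--         elif char == ')':
--             if not stack:
--                 return False
--             stack.pop()
--     return not stack
--
-- def generate_structures(n, pos=0, structure='', open_brackets=0):
--     if pos == n:
--         if is_valid_structure(structure):
--             return [structure]
--         return []
--
--     structures = []
--     if open_brackets > 0:
--         structures += generate_structures(n, pos + 1, structure + ')', open_brackets - 1)
--     structures += generate_structures(n, pos + 1, structure + '.', open_brackets)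
--     if pos < n - open_brackets:
--         structures += generate_structures(n, pos + 1, structure + '(', open_brackets + 1)
--     return structures
-- ===== SOURCE B (Python) =====
-- def is_valid_structure(structure):
--     stack = []
--     for char in structure:
--         if char == '(':
--             stack.append(char)
--         elif char == ')':
--             if not stack:
--                 return False
--             stack.pop()
--     return not stack
--
-- def generate_structures(n, pos=0, structure='', open_brackets=0):
--     # Iterative DFS with an explicit work stack instead of recursion;
--     # children pushed in reverse so pop order matches A's preorder.
--     results = []
--     stack = [(pos, structure, open_brackets)]
--     while stack:
--         p, s, ob = stack.pop()
--         if p == n: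
--             if is_valid_structure(s):
--                 results.append(s)
--         else:
--             if p < n - ob:
--                 stack.append((p + 1, s + '(', ob + 1))
--             stack.append((p + 1, s + '.', ob))
--             if ob > 0:
--                 stack.append((p + 1, s + ')', ob - 1))
--     return results
-- ===== Notes on version B (the rewrite author's own statement) =====
-- stated objective: alternative
-- what changed: Replaces A's tree recursion with an iterative DFS over an explicit work stack of (pos, structure, open_brackets) states, pushing successors in reverse so pop order reproduces A's preorder result list.
import Mathlib
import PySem

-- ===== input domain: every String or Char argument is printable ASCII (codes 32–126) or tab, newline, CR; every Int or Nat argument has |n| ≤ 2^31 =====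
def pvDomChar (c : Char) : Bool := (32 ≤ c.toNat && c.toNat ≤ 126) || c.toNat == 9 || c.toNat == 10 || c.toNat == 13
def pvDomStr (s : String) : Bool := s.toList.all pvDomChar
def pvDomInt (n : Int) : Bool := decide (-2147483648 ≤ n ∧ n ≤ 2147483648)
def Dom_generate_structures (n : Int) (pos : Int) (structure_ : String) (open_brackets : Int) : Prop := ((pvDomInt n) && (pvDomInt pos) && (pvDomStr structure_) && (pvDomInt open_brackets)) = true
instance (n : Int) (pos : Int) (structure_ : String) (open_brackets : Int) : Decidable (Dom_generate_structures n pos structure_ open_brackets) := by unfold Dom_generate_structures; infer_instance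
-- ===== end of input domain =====

-- B replaces A's tree recursion by an iterative DFS with an explicit work stack (same cost, different decomposition).


-- ===== PORT A =====
-- is_valid_structure: the for-loop over the characters with a stack and an early `return False`.
def ivsLoop : List Char → List Char → Bool
  | [], stack => stack.isEmpty
  | c :: rest, stack =>
    if c = '(' then ivsLoop rest ('(' :: stack)
    else if c = ')' then
      match stack with
      | [] => false
      | _ :: st => ivsLoop rest st
    else ivsLoop rest stack

def is_valid_structure (s : String) : Bool := ivsLoop s.toList []

-- A's recursion, made total with fuel = (n - pos).toNat; fuel runs out only when pos > n,
-- exactly where the Python recursion diverges (excluded by Pre_).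
def genA (fuel : Nat) (n pos : Int) (structure_ : String) (open_brackets : Int) : List String :=
  if pos == n then (if is_valid_structure structure_ then [structure_] else [])
  else match fuel with
    | 0 => []
    | f + 1 =>
      (if open_brackets > 0 then genA f n (pos + 1) (structure_ ++ ")") (open_brackets - 1) else [])
      ++ genA f n (pos + 1) (structure_ ++ ".") open_brackets
      ++ (if pos < n - open_brackets then genA f n (pos + 1) (structure_ ++ "(") (open_brackets + 1) else [])

def generate_structures (n : Int) (pos : Int) (structure_ : String) (open_brackets : Int) : List String :=
  genA (n - pos).toNat n pos structure_ open_brackets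

-- ===== PORT B =====
-- The while-loop over the explicit work stack (head of the list = top of the stack);
-- fuel decreases by one per popped state and runs out only when some reachable pos exceeds n
-- (again only possible when pos > n, excluded by Pre_).
def loopB (fuel : Nat) (n : Int) : List (Int × String × Int) → List String → List String
  | [], acc => acc
  | (p, s, ob) :: rest, acc =>
    match fuel with
    | 0 => acc
    | f + 1 =>
      if p == n then
        loopB f n rest (if is_valid_structure s then acc ++ [s] else acc)
      else
        loopB f n
          ((if ob > 0 then [(p + 1, s ++ ")", ob - 1)] else [])
            ++ [(p + 1, s ++ ".", ob)]
            ++ (if p < n - ob then [(p + 1, s ++ "(", ob + 1)] else [])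
            ++ rest) acc

def generate_structures_alt (n : Int) (pos : Int) (structure_ : String) (open_brackets : Int) : List String :=
  loopB (4 ^ (n - pos).toNat) n [(pos, structure_, open_brackets)] []

-- ===== PRECONDITION & SPEC =====
-- Pre_ excludes pos > n, on which the Python A recurses forever past n and raises RecursionError.
def Pre_generate_structures (n : Int) (pos : Int) (structure_ : String) (open_brackets : Int) : Prop :=
  pos ≤ n
instance (n : Int) (pos : Int) (structure_ : String) (open_brackets : Int) : Decidable (Pre_generate_structures n pos structure_ open_brackets) := by unfold Pre_generate_structures; infer_instance

def pvWitness_generate_structures : Int × Int × String × Int := (4, 0, "", 0)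

def Spec_generate_structures (n : Int) (pos : Int) (structure_ : String) (open_brackets : Int) (out : List String) : Prop := out = generate_structures_alt n pos structure_ open_brackets
instance (n : Int) (pos : Int) (structure_ : String) (open_brackets : Int) (out : List String) : Decidable (Spec_generate_structures n pos structure_ open_brackets out) := by unfold Spec_generate_structures; infer_instance

-- ===== CLAIM (what is proved, stated in full; the proofs are below) =====
def Claim_equal_generate_structures : Prop := ∀ (n : Int) (pos : Int) (structure_ : String) (open_brackets : Int), Dom_generate_structures n pos structure_ open_brackets → Pre_generate_structures n pos structure_ open_brackets → Spec_generate_structures n pos structure_ open_brackets (generate_structures n pos structure_ open_brackets)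

-- ===== LEMMAS AND PROOFS =====

-- Measure of a work stack: Σ 4^(n - pos).toNat over its entries.
def muB (n : Int) : List (Int × String × Int) → Nat
  | [] => 0
  | e :: rest => 4 ^ (n - e.1).toNat + muB n rest

theorem muB_append (n : Int) (xs ys : List (Int × String × Int)) :
    muB n (xs ++ ys) = muB n xs + muB n ys := by
  induction xs with
  | nil => simp [muB]
  | cons e rest ih => simp [muB, ih]; omega

-- Main loop invariant: with enough fuel, the stack loop appends, to acc, the concatenation
-- of A's results for the stacked states in order.
theorem loopB_eq (n : Int) : ∀ (f : Nat) (stack : List (Int × String × Int)) (acc : List String),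
    (∀ e ∈ stack, e.1 ≤ n) → muB n stack ≤ f →
    loopB f n stack acc
      = acc ++ stack.flatMap (fun e => genA (n - e.1).toNat n e.1 e.2.1 e.2.2) := by
  intro f
  induction f with
  | zero =>
    intro stack acc hpos hmu
    cases stack with
    | nil => simp [loopB]
    | cons e rest =>
      exfalso
      have h1 : 1 ≤ 4 ^ (n - e.1).toNat := Nat.one_le_pow _ _ (by norm_num)
      simp only [muB] at hmu
      omega
  | succ f ih =>
    intro stack acc hpos hmu
    cases stack with
    | nil => simp [loopB]
    | cons e rest =>
      obtain ⟨p, s, ob⟩ := e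
      have hp : p ≤ n := hpos (p, s, ob) (by simp)
      by_cases hpn : p = n
      · simp only [loopB, hpn, beq_self_eq_true, if_true]
        have hrest : muB n rest ≤ f := by
          have h1 : 1 ≤ 4 ^ (n - p).toNat := Nat.one_le_pow _ _ (by norm_num)
          simp only [muB] at hmu
          omega
        rw [ih rest _ (fun e he => hpos e (by simp [he])) hrest]
        rw [List.flatMap_cons]
        have hgen : genA (n - n).toNat n n s ob = if is_valid_structure s then [s] else [] := by
          simp [genA]
        rw [hgen]
        by_cases hv : is_valid_structure s <;> simp [hv]
      · have hlt : p < n := lt_of_le_of_ne hp hpn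
        have hk : (n - p).toNat = ((n - (p + 1)).toNat) + 1 := by omega
        simp only [loopB, beq_iff_eq, hpn, if_false]
        set ch : List (Int × String × Int) :=
          (if ob > 0 then [(p + 1, s ++ ")", ob - 1)] else [])
            ++ [(p + 1, s ++ ".", ob)]
            ++ (if p < n - ob then [(p + 1, s ++ "(", ob + 1)] else []) with hch
        have hch1 : ∀ e ∈ ch, e.1 = p + 1 := by
          intro e he
          simp only [hch, List.mem_append, List.mem_singleton] at he
          rcases he with (he | he) | he
          · split_ifs at he <;> simp_all
          · simp [he]
          · split_ifs at he <;> simp_all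
        have hchpos : ∀ e ∈ ch ++ rest, e.1 ≤ n := by
          intro e he
          rcases List.mem_append.1 he with h | h
          · have := hch1 e h; omega
          · exact hpos e (by simp [h])
        have hmuch : muB n ch ≤ 3 * 4 ^ (n - (p + 1)).toNat := by
          simp only [hch, muB_append]
          split_ifs <;> simp [muB] <;> omega
        have hmu' : muB n (ch ++ rest) ≤ f := by
          rw [muB_append]
          simp only [muB] at hmu
          have h4 : 4 ^ (n - p).toNat = 4 * 4 ^ (n - (p + 1)).toNat := by
            rw [hk, pow_succ]; ring
          have h1 : 1 ≤ 4 ^ (n - (p + 1)).toNat := Nat.one_le_pow _ _ (by norm_num)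
          omega
        have hgen : genA (n - p).toNat n p s ob
          = (if ob > 0 then genA (n - (p + 1)).toNat n (p + 1) (s ++ ")") (ob - 1) else [])
            ++ genA (n - (p + 1)).toNat n (p + 1) (s ++ ".") ob
            ++ (if p < n - ob then genA (n - (p + 1)).toNat n (p + 1) (s ++ "(") (ob + 1) else []) := by
          rw [hk]; simp [genA, hpn]
        rw [ih (ch ++ rest) acc hchpos hmu', List.flatMap_append, List.flatMap_cons, hgen]
        simp only [hch, List.flatMap_append]
        split_ifs <;> simp

-- ===== VERDICT (by name: the statement is the Claim_ definition above) =====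
theorem generate_structures_spec : Claim_equal_generate_structures := by
  intro n pos s ob _ hpre
  unfold Spec_generate_structures generate_structures generate_structures_alt
  rw [loopB_eq n _ [(pos, s, ob)] [] (by intro e he; simp at he; simp [he]; exact hpre)
      (by simp [muB])]
  simp
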